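-- pv_equiv track=rewrite | github.com/MrBrantCode/unitest_baseline | mut_generate/mist_train_cf/cf_94003/solution.py | largest_prime_palindrome
-- ===== SOURCE A (Python) =====
-- def largest_prime_palindrome(test_list):
--     def is_prime(n):
--         if n <= 1:
--             return False
--         for i in range(2, int(n**0.5) + 1):
--             if n % i == 0:
--                 return False
--         return True
--
--     def is_palindrome(n):
--         return str(n) == str(n)[::-1]
--
--     largest_palindrome = 0
--     for num in test_list:
--         if is_palindrome(num) and is_prime(num):
--             largest_palindrome = max(largest_palindrome, num)
--     return largest_palindrome
-- ===== SOURCE B (Python) =====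
-- def largest_prime_palindrome(test_list):
--     def is_prime(n):
--         if n <= 1:
--             return False
--         for i in range(2, int(n**0.5) + 1):
--             if n % i == 0:
--                 return False
--         return True
--
--     def is_palindrome(n):
--         return str(n) == str(n)[::-1]
--
--     for num in sorted(test_list, reverse=True):
--         if is_palindrome(num) and is_prime(num):
--             return num
--     return 0
-- ===== Notes on version B (the rewrite author's own statement) =====
-- stated objective: alternative
-- what changed: B sorts a copy of the list in descending order and returns the first palindromic prime it meets (early exit), instead of A's full scan maintaining a running max.
import Mathlib
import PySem

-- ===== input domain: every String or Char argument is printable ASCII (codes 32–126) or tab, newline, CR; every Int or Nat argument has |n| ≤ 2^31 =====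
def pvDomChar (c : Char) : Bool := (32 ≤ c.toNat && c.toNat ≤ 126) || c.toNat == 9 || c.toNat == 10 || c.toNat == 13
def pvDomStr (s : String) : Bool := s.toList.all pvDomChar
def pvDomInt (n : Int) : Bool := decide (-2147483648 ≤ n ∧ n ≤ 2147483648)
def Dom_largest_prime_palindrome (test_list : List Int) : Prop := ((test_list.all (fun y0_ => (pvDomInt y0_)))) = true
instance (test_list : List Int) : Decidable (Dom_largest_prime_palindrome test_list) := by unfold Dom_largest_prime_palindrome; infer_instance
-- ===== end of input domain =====

-- B replaces A's running-max scan by sorting a copy descending and returning the first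
-- palindromic prime (alternative decomposition, same return value; neither mutates the input).

-- ===== PORT A =====
-- shared helpers: Source B keeps A's is_prime / is_palindrome unchanged, so both ports use these.
-- int(n**0.5) is ported as Nat.sqrt: exact for 2 ≤ n ≤ 2^31 (float pow is exact there),
-- and is_prime only reaches the sqrt when 1 < n.
def pvIsPrime (n : Int) : Bool :=
  if n ≤ 1 then false
  else (PySem.List.pyRange 2 ((n.toNat.sqrt : Int) + 1) 1).all
         (fun i => !(PySem.Int.mod n i == 0))

def pvIsPalindrome (n : Int) : Bool :=
  PySem.Int.toChars n == (PySem.Int.toChars n).reverse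

def largest_prime_palindrome (test_list : List Int) : Int :=
  test_list.foldl
    (fun largest_palindrome num =>
      if pvIsPalindrome num && pvIsPrime num then max largest_palindrome num
      else largest_palindrome) 0

-- ===== PORT B =====
-- the early-exit loop over the descending-sorted copy
def pvFirstGood : List Int → Int
  | [] => 0
  | num :: rest => if pvIsPalindrome num && pvIsPrime num then num else pvFirstGood rest

def largest_prime_palindrome_alt (test_list : List Int) : Int :=
  pvFirstGood (PySem.List.sorted test_list (fun x => x) true)

-- ===== PRECONDITION & SPEC =====
def Spec_largest_prime_palindrome (test_list : List Int) (out : Int) : Prop := out = largest_prime_palindrome_alt test_list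
instance (test_list : List Int) (out : Int) : Decidable (Spec_largest_prime_palindrome test_list out) := by unfold Spec_largest_prime_palindrome; infer_instance

-- ===== CLAIM (what is proved, stated in full; the proofs are below) =====
def Claim_equal_largest_prime_palindrome : Prop := ∀ (test_list : List Int), Dom_largest_prime_palindrome test_list → Spec_largest_prime_palindrome test_list (largest_prime_palindrome test_list)

-- ===== LEMMAS AND PROOFS =====

-- A's loop is the running max over the elements passing the test
theorem pvA_eq_foldl_filter (l : List Int) (a : Int) :
    l.foldl
      (fun largest_palindrome num =>
        if pvIsPalindrome num && pvIsPrime num then max largest_palindrome num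
        else largest_palindrome) a
    = (l.filter (fun num => pvIsPalindrome num && pvIsPrime num)).foldl max a := by
  induction l generalizing a with
  | nil => rfl
  | cons x t ih =>
    simp only [List.foldl_cons, List.filter_cons]
    by_cases h : (pvIsPalindrome x && pvIsPrime x) = true
    · simp only [h, if_pos]; exact ih (max a x)
    · simp only [h, if_neg, Bool.false_eq_true, not_false_eq_true]; exact ih a

-- B's loop returns the head of the filtered list (or 0)
theorem pvFirstGood_eq_head (l : List Int) :
    pvFirstGood l = (l.filter (fun num => pvIsPalindrome num && pvIsPrime num)).headD 0 := by
  induction l with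
  | nil => rfl
  | cons x t ih =>
    simp only [pvFirstGood, List.filter_cons]
    by_cases h : (pvIsPalindrome x && pvIsPrime x) = true
    · simp [h]
    · simp [h, ih]

-- elements that pass the test are > 1
theorem pvGood_pos {n : Int} (h : (pvIsPalindrome n && pvIsPrime n) = true) : 1 < n := by
  have hp : pvIsPrime n = true := by revert h; cases pvIsPrime n <;> simp
  unfold pvIsPrime at hp
  by_contra hle
  simp [show n ≤ 1 by omega] at hp

-- running max from a dominant starting point
theorem pvFoldl_max_of_le (t : List Int) (a : Int) (h : ∀ y ∈ t, y ≤ a) :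
    t.foldl max a = a := by
  induction t generalizing a with
  | nil => rfl
  | cons x s ih =>
    simp only [List.foldl_cons]
    rw [max_eq_left (h x (by simp))]
    exact ih a (fun y hy => h y (by simp [hy]))

-- ===== VERDICT (by name: the statement is the Claim_ definition above) =====
theorem largest_prime_palindrome_spec : Claim_equal_largest_prime_palindrome := by
  intro l _
  show largest_prime_palindrome l = largest_prime_palindrome_alt l
  unfold largest_prime_palindrome largest_prime_palindrome_alt
  rw [pvA_eq_foldl_filter, pvFirstGood_eq_head]
  set good := fun num => pvIsPalindrome num && pvIsPrime num with hgood
  have hperm : (PySem.List.sorted l (fun x => x) true).Perm l := PySem.List.sorted_perm l _ _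
  have hpw : ((PySem.List.sorted l (fun x => x) true).filter good).Pairwise (fun a b => b ≤ a) :=
    (PySem.List.sorted_pairwise_rev l (fun x => x)).filter good
  have hfp : (l.filter good).foldl max 0
      = (((PySem.List.sorted l (fun x => x) true).filter good)).foldl max 0 :=
    ((hperm.filter good).symm.foldl_eq 0)
  rw [hfp]
  cases hm : (PySem.List.sorted l (fun x => x) true).filter good with
  | nil => simp
  | cons x t =>
    rw [hm] at hpw
    have hxmem : x ∈ List.filter good (PySem.List.sorted l (fun x => x) true) := by
      rw [hm]; exact List.mem_cons_self
    have hxg : good x = true := List.of_mem_filter hxmem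
    rw [hgood] at hxg
    have hx : 1 < x := pvGood_pos hxg
    simp only [List.foldl_cons, List.headD_cons]
    rw [max_eq_right (by omega)]
    exact pvFoldl_max_of_le t x (fun y hy => (List.pairwise_cons.mp hpw).1 y hy)
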